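-- pv_equiv track=rewrite | github.com/patrickdugan/GPTStoryworld | mcp-storyworld-encounter/swmd_store.py | _neighbor_ids
-- ===== SOURCE A (Python) =====
-- from typing import Any, Dict, List
--
-- def _neighbor_ids(order: List[str], encounter_id: str, hops: int) -> List[str]:
--     if encounter_id not in order:
--         return []
--     idx = order.index(encounter_id)
--     out: List[str] = []
--     for offset in range(1, hops + 1):
--         if idx - offset >= 0:
--             out.append(order[idx - offset])
--         if idx + offset < len(order):
--             out.append(order[idx + offset])
--     return out
-- ===== SOURCE B (Python) =====
-- from typing import List
--
--
-- def _interleave(a: List[str], b: List[str]) -> List[str]: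
--     if not a:
--         return list(b)
--     if not b:
--         return list(a)
--     return [a[0], b[0]] + _interleave(a[1:], b[1:])
--
--
-- def _neighbor_ids(order: List[str], encounter_id: str, hops: int) -> List[str]:
--     if encounter_id not in order:
--         return []
--     idx = order.index(encounter_id)
--     h = max(hops, 0)
--     left = order[max(0, idx - h):idx][::-1]      # nearest-first left neighbors
--     right = order[idx + 1:idx + 1 + h]           # nearest-first right neighbors
--     return _interleave(left, right)
-- ===== Notes on version B (the rewrite author's own statement) =====
-- stated objective: simpler
-- what changed: B replaces A's per-offset loop with two bounds checks per iteration by taking the left slice reversed and the right slice and interleaving them with a recursive zip-style helper.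
import Mathlib
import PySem

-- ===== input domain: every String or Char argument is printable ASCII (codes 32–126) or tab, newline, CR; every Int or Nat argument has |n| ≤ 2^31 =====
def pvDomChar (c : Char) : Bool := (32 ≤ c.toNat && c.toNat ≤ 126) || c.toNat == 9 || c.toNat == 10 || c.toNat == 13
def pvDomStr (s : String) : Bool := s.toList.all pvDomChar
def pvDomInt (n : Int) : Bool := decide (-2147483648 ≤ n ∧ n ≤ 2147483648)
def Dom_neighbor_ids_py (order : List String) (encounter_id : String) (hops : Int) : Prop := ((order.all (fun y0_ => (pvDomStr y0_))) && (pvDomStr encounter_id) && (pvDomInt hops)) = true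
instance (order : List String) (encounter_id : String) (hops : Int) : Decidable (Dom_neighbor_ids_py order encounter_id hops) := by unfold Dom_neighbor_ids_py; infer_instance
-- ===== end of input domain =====

-- B computes the same interleaved neighbor list from two slices and a recursive interleave instead of A's offset loop; objective: simpler.

-- ===== PORT A =====
def neighbor_ids_py (order : List String) (encounter_id : String) (hops : Int) : List String :=
  if encounter_id ∉ order then []
  else
    match PySem.List.index? order encounter_id with
    | none => []   -- unreachable: guarded by the membership test above
    | some idx =>
      (PySem.List.pyRange 1 (hops + 1) 1).foldl
        (fun out offset =>
          let out1 := if (idx : Int) - offset ≥ 0 then out ++ [PySem.List.pyGetD order ((idx : Int) - offset) ""] else out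
          if (idx : Int) + offset < (order.length : Int) then out1 ++ [PySem.List.pyGetD order ((idx : Int) + offset) ""] else out1)
        []

-- ===== PORT B =====
def interleavePy : List String → List String → List String
  | [], b => b
  | a, [] => a
  | x :: xs, y :: ys => x :: y :: interleavePy xs ys

def neighbor_ids_py_alt (order : List String) (encounter_id : String) (hops : Int) : List String :=
  if encounter_id ∉ order then []
  else
    match PySem.List.index? order encounter_id with
    | none => []   -- unreachable: guarded by the membership test above
    | some idx =>
      let h := max hops 0
      -- order[max(0, idx-h):idx][::-1]; [::-1] is reverse (PySem.List.slice?_none_none_neg_one)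
      let left := (PySem.List.slice order (some (max 0 ((idx : Int) - h))) (some (idx : Int))).reverse
      let right := PySem.List.slice order (some ((idx : Int) + 1)) (some ((idx : Int) + 1 + h))
      interleavePy left right

-- ===== PRECONDITION & SPEC =====
def Spec_neighbor_ids_py (order : List String) (encounter_id : String) (hops : Int) (out : List String) : Prop := out = neighbor_ids_py_alt order encounter_id hops
instance (order : List String) (encounter_id : String) (hops : Int) (out : List String) : Decidable (Spec_neighbor_ids_py order encounter_id hops out) := by unfold Spec_neighbor_ids_py; infer_instance

-- ===== CLAIM (what is proved, stated in full; the proofs are below) =====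
def Claim_equal_neighbor_ids_py : Prop := ∀ (order : List String) (encounter_id : String) (hops : Int), Dom_neighbor_ids_py order encounter_id hops → Spec_neighbor_ids_py order encounter_id hops (neighbor_ids_py order encounter_id hops)

-- ===== LEMMAS AND PROOFS =====

lemma interleavePy_nil_left (b : List String) : interleavePy [] b = b := rfl

lemma interleavePy_nil_right (a : List String) : interleavePy a [] = a := by
  cases a <;> rfl

-- appending one (optional) element of each side to an interleave extends the takes by one
lemma interleave_take_succ (h : Nat) (L R : List String) :
    interleavePy (L.take (h + 1)) (R.take (h + 1)) =
      interleavePy (L.take h) (R.take h) ++ L[h]?.toList ++ R[h]?.toList := by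
  induction h generalizing L R with
  | zero => cases L <;> cases R <;> simp [interleavePy, List.take_add_one]
  | succ h ih =>
    cases L with
    | nil => simp [interleavePy_nil_left, List.take_add_one]
    | cons a as =>
      cases R with
      | nil => simp [interleavePy_nil_right, List.take_add_one]
      | cons b bs => simp [interleavePy, ih]

-- A's loop up to h offsets equals the interleave of the first h left and right neighbors
lemma loopA_eq (order : List String) (idx : Nat) (hidx : idx < order.length) (h : Nat) :
    (PySem.List.pyRange 1 ((h : Int) + 1) 1).foldl
        (fun out offset =>
          let out1 := if (idx : Int) - offset ≥ 0 then out ++ [PySem.List.pyGetD order ((idx : Int) - offset) ""] else out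
          if (idx : Int) + offset < (order.length : Int) then out1 ++ [PySem.List.pyGetD order ((idx : Int) + offset) ""] else out1)
        []
      = interleavePy (((order.take idx).reverse).take h) ((order.drop (idx + 1)).take h) := by
  induction h with
  | zero => simp [PySem.List.pyRange_one_eq_nil, interleavePy]
  | succ h ih =>
    have h1 : (((h + 1 : Nat) : Int) + 1) = ((h : Int) + 1) + 1 := by push_cast; ring
    rw [h1, PySem.List.pyRange_one_succ_right (by omega), List.foldl_append, ih,
      interleave_take_succ]
    have hlen2 : (order.take idx).length = idx := by
      simp [Nat.le_of_lt hidx]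
    have hlenL : ((order.take idx).reverse).length = idx := by
      simp [hlen2]
    have eL : ∀ X : List String,
        (if (idx : Int) - ((h : Int) + 1) ≥ 0 then X ++ [PySem.List.pyGetD order ((idx : Int) - ((h : Int) + 1)) ""] else X)
          = X ++ ((order.take idx).reverse)[h]?.toList := by
      intro X
      by_cases hL : h < idx
      · rw [if_pos (by omega)]
        have hidxL : (idx : Int) - ((h : Int) + 1) = ((idx - (h + 1) : Nat) : Int) := by omega
        rw [hidxL, PySem.List.pyGetD_natCast,
          List.getElem?_reverse (by omega), hlen2,
          List.getElem?_take_of_lt (by omega),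
          show idx - 1 - h = idx - (h + 1) by omega,
          List.getElem?_eq_getElem (by omega),
          List.getD_eq_getElem order "" (by omega)]
        simp
      · rw [if_neg (by omega), List.getElem?_eq_none (by omega)]
        simp
    have eR : ∀ X : List String,
        (if (idx : Int) + ((h : Int) + 1) < (order.length : Int) then X ++ [PySem.List.pyGetD order ((idx : Int) + ((h : Int) + 1)) ""] else X)
          = X ++ (order.drop (idx + 1))[h]?.toList := by
      intro X
      by_cases hR : idx + 1 + h < order.length
      · rw [if_pos (by omega)]
        have hidxR : (idx : Int) + ((h : Int) + 1) = ((idx + (h + 1) : Nat) : Int) := by omega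
        rw [hidxR, PySem.List.pyGetD_natCast,
          List.getElem?_drop,
          show idx + 1 + h = idx + (h + 1) by omega,
          List.getElem?_eq_getElem (by omega),
          List.getD_eq_getElem order "" (by omega)]
        simp
      · rw [if_neg (by omega), List.getElem?_eq_none (by simp; omega)]
        simp
    dsimp only [List.foldl_cons, List.foldl_nil]
    rw [eR, eL, List.append_assoc]

-- B's reversed left slice is the take of the reversed prefix A's loop walks through
lemma left_rev (order : List String) (k h : Nat) (hk : k ≤ order.length) :
    ((order.drop (k - h)).take (k - (k - h))).reverse = ((order.take k).reverse).take h := by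
  rw [List.take_drop, show (k - h) + (k - (k - h)) = k by omega, List.reverse_drop]
  have hlen : (order.take k).length = k := by simp [hk]
  rw [hlen]
  by_cases hc : h ≤ k
  · rw [show k - (k - h) = h by omega]
  · have l1 : ((order.take k).reverse).length ≤ k := by
      simp only [List.length_reverse, hlen]
      omega
    have l2 : ((order.take k).reverse).length ≤ h := by
      simp only [List.length_reverse, hlen]
      omega
    rw [show k - (k - h) = k by omega, List.take_of_length_le l1, List.take_of_length_le l2]

-- ===== VERDICT (by name: the statement is the Claim_ definition above) =====
theorem neighbor_ids_py_spec : Claim_equal_neighbor_ids_py := by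
  intro order e hops _
  unfold Spec_neighbor_ids_py neighbor_ids_py neighbor_ids_py_alt
  by_cases hm : e ∈ order
  · rw [if_neg (by simp [hm]), if_neg (by simp [hm])]
    obtain ⟨k, hk⟩ := Option.isSome_iff_exists.mp
      ((PySem.List.index?_isSome_iff (xs := order) (v := e)).mpr hm)
    obtain ⟨hklt, -⟩ := PySem.List.getElem_of_index?_eq_some hk
    rw [hk]
    dsimp only
    have hrange : PySem.List.pyRange 1 (hops + 1) 1
        = PySem.List.pyRange 1 (((max hops 0).toNat : Int) + 1) 1 := by
      by_cases hc : hops ≤ 0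
      · rw [PySem.List.pyRange_one_eq_nil (by omega), PySem.List.pyRange_one_eq_nil (by omega)]
      · congr 1
        omega
    rw [hrange, loopA_eq order k hklt ((max hops 0).toNat)]
    have eL' : max 0 ((k : Int) - max hops 0) = ((k - (max hops 0).toNat : Nat) : Int) := by omega
    have eR1 : (k : Int) + 1 = ((k + 1 : Nat) : Int) := by push_cast; ring
    have eR2 : (k : Int) + 1 + max hops 0 = (((k + 1) + (max hops 0).toNat : Nat) : Int) := by omega
    rw [eL', eR2, eR1, PySem.List.slice_natCast, PySem.List.slice_natCast,
      left_rev order k ((max hops 0).toNat) (Nat.le_of_lt hklt),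
      show (k + 1 + (max hops 0).toNat) - (k + 1) = (max hops 0).toNat by omega]
  · rw [if_pos (by simp [hm]), if_pos (by simp [hm])]
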